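-- pv_equiv track=rewrite | github.com/tinh2044/python | manchine_learning/numby/.history/chart_20221122092126.py | convert
-- ===== SOURCE A (Python) =====
-- def convert(string):
--     list_1 = []
--     i = 0
--     new_str = ""
--     while i < len(string):
--         if string[i] == "x":
--             string = string[:i] + "*" + string[i:]
--             i += 2
--         else:
--             i += 1
--     return string
-- ===== SOURCE B (Python) =====
-- def convert(string):
--     return "*x".join(string.split("x"))
-- ===== Notes on version B (the rewrite author's own statement) =====
-- stated objective: idiomatic
-- what changed: Replaces A's quadratic index-scanning loop that re-builds the string by splicing '*' in before each 'x' with a linear tokenize-then-reassemble strategy: split the string on 'x' into segments and rejoin them with '*x'.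
import Mathlib
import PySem

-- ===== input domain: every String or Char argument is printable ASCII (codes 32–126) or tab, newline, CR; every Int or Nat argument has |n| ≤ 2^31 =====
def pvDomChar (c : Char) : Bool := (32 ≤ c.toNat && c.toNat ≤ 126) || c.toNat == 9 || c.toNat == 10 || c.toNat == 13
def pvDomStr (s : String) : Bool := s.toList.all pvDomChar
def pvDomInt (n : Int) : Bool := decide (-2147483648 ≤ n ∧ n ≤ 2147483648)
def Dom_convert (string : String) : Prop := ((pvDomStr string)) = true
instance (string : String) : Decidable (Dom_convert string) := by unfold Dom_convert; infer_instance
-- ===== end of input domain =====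

-- B inserts '*' before every 'x' by splitting on 'x' and rejoining with "*x" instead of A's in-place splice loop (idiomatic).

-- ===== PORT A =====
-- A's while loop: state (string, i); on 'x' splice "*" in before position i and jump i by 2, else step by 1.
-- (A's local variables list_1 and new_str are dead and not ported.)
def convertAux (s : List Char) (i : Nat) : List Char :=
  if h : i < s.length then
    if PySem.List.pyGet? s (i : Int) = some 'x' then
      convertAux (PySem.List.slice s none (some (i : Int)) ++ ['*'] ++ PySem.List.slice s (some (i : Int)) none) (i + 2)
    else
      convertAux s (i + 1)
  else s
termination_by s.length - i
decreasing_by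
  · rw [PySem.List.slice_to s (by positivity : (0:Int) ≤ (i : Int)),
        PySem.List.slice_from s (by positivity : (0:Int) ≤ (i : Int))]
    simp
    omega
  · omega

def convert (string : String) : String := String.ofList (convertAux string.toList 0)

-- ===== PORT B =====
-- "*x".join(string.split("x")); sep "x" is nonempty, so split is PySem.Chars.splitOn.
def convert_alt (string : String) : String :=
  String.ofList (PySem.Chars.join "*x".toList (PySem.Chars.splitOn string.toList "x".toList))

-- ===== PRECONDITION & SPEC =====
def Spec_convert (string : String) (out : String) : Prop := out = convert_alt string
instance (string : String) (out : String) : Decidable (Spec_convert string out) := by unfold Spec_convert; infer_instance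

-- ===== CLAIM (what is proved, stated in full; the proofs are below) =====
def Claim_equal_convert : Prop := ∀ (string : String), Dom_convert string → Spec_convert string (convert string)

-- ===== LEMMAS AND PROOFS =====

/-- The common specification: insert '*' before every 'x'. -/
def ins : List Char → List Char
  | [] => []
  | c :: t => if c = 'x' then '*' :: 'x' :: ins t else c :: ins t

/-- Prepend to the first segment. -/
def mapFirst (f : List Char → List Char) : List (List Char) → List (List Char)
  | [] => []
  | a :: r => f a :: r

/-- The simple structural splitter on 'x'. -/
def split1 : List Char → List (List Char)
  | [] => [[]]
  | c :: t => if c = 'x' then [] :: split1 t else mapFirst (c :: ·) (split1 t)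

theorem split1_ne_nil (l : List Char) : split1 l ≠ [] := by
  induction l with
  | nil => simp [split1]
  | cons c t ih =>
    simp only [split1]
    split_ifs
    · simp
    · cases h : split1 t with
      | nil => exact absurd h ih
      | cons a r => simp [mapFirst]

theorem mapFirst_cons (f : List Char → List Char) (a : List Char) (r : List (List Char)) :
    mapFirst f (a :: r) = f a :: r := rfl

theorem mapFirst_id (ll : List (List Char)) : mapFirst (fun a => a) ll = ll := by
  cases ll <;> simp [mapFirst]

theorem mapFirst_comp (f g : List Char → List Char) (ll : List (List Char)) :
    mapFirst f (mapFirst g ll) = mapFirst (fun a => f (g a)) ll := by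
  cases ll <;> simp [mapFirst]

theorem go_eq (fuel : Nat) (l cur : List Char) (acc2 : List (List Char))
    (h : l.length < fuel) :
    PySem.Chars.splitOn.go ['x'] fuel l cur acc2 =
      acc2.reverse ++ mapFirst (cur.reverse ++ ·) (split1 l) := by
  induction fuel generalizing l cur acc2 with
  | zero => omega
  | succ fuel ih =>
    cases l with
    | nil => simp [PySem.Chars.splitOn.go, split1, mapFirst]
    | cons c rest =>
      rw [PySem.Chars.splitOn.go]
      by_cases hc : c = 'x'
      · subst hc
        have hp : List.isPrefixOf ['x'] ('x' :: rest) = true := by simp [List.isPrefixOf]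
        rw [if_pos hp]
        simp only [List.length_singleton, List.drop_one, List.tail_cons]
        rw [ih rest [] _ (by simpa using Nat.lt_of_succ_lt_succ h)]
        simp [split1, mapFirst_cons, mapFirst_id]
      · have hp : List.isPrefixOf ['x'] (c :: rest) = false := by
          simp only [List.isPrefixOf, List.isPrefixOf_nil_left, Bool.and_true]
          simp only [beq_eq_false_iff_ne, ne_eq]
          exact fun e => hc e.symm
        rw [if_neg (by simp [hp])]
        rw [ih rest (c :: cur) _ (by simpa using Nat.lt_of_succ_lt_succ h)]
        simp only [split1, if_neg hc, List.reverse_cons, mapFirst_comp]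
        congr 1
        cases hs : split1 rest with
        | nil => exact absurd hs (split1_ne_nil rest)
        | cons a r => simp [mapFirst]

theorem splitOn_eq_split1 (l : List Char) :
    PySem.Chars.splitOn l ['x'] = split1 l := by
  rw [PySem.Chars.splitOn, go_eq (l.length + 1) l [] [] (by omega)]
  simp only [List.reverse_nil, List.nil_append]
  exact mapFirst_id _

theorem join_split1 (l : List Char) :
    PySem.Chars.join ['*', 'x'] (split1 l) = ins l := by
  induction l with
  | nil => simp [split1, ins, PySem.Chars.join, List.intercalate]
  | cons c t ih =>
    simp only [split1, ins]
    by_cases hc : c = 'x'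
    · subst hc
      simp only [if_pos rfl]
      rw [← ih]
      cases hs : split1 t with
      | nil => exact absurd hs (split1_ne_nil t)
      | cons a r =>
        simp [PySem.Chars.join, List.intercalate]
    · simp only [if_neg hc]
      rw [← ih]
      cases hs : split1 t with
      | nil => exact absurd hs (split1_ne_nil t)
      | cons a r =>
        cases r <;> simp [PySem.Chars.join, List.intercalate, mapFirst_cons]

theorem convertAux_eq (s : List Char) (i : Nat) :
    convertAux s i = s.take i ++ ins (s.drop i) := by
  by_cases h : i < s.length
  · have hdrop : s.drop i = s[i] :: s.drop (i + 1) :=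
      (List.drop_eq_getElem_cons h)
    rw [convertAux, dif_pos h]
    by_cases hx : s[i] = 'x'
    · have hget : PySem.List.pyGet? s (i : Int) = some 'x' := by
        rw [PySem.List.pyGet?_natCast]
        simp [List.getElem?_eq_getElem h, hx]
      rw [if_pos hget,
          PySem.List.slice_to s (by positivity : (0:Int) ≤ (i : Int)),
          PySem.List.slice_from s (by positivity : (0:Int) ≤ (i : Int))]
      simp only [Int.toNat_natCast]
      have hlen : (s.take i).length = i := List.length_take_of_le (by omega)
      rw [convertAux_eq (s.take i ++ ['*'] ++ s.drop i) (i + 2)]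
      rw [hdrop, hx]
      have h2 : s.take i ++ ['*'] ++ 'x' :: s.drop (i + 1)
          = (s.take i ++ ['*', 'x']) ++ s.drop (i + 1) := by simp
      have hlen2 : (s.take i ++ ['*', 'x']).length = i + 2 := by simp [hlen]
      rw [h2, List.take_left' hlen2, List.drop_left' hlen2]
      simp [ins]
    · have hget : ¬ PySem.List.pyGet? s (i : Int) = some 'x' := by
        rw [PySem.List.pyGet?_natCast]
        simp [List.getElem?_eq_getElem h, hx]
      rw [if_neg hget, convertAux_eq s (i + 1), hdrop]
      simp only [ins, if_neg hx]
      have ht : s.take (i+1) = s.take i ++ [s[i]] := by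
        rw [List.take_add_one, List.getElem?_eq_getElem h]; simp
      rw [ht, List.append_assoc, List.singleton_append]
  · rw [convertAux, dif_neg h]
    rw [List.take_of_length_le (by omega), List.drop_of_length_le (by omega)]
    simp [ins]
termination_by s.length - i
decreasing_by all_goals first
  | omega
  | (simp
     omega)

-- ===== VERDICT (by name: the statement is the Claim_ definition above) =====
theorem convert_spec : Claim_equal_convert := by
  intro string _
  unfold Spec_convert convert convert_alt
  rw [convertAux_eq string.toList 0]
  have : "x".toList = ['x'] := rfl
  rw [this, splitOn_eq_split1]
  have h2 : "*x".toList = ['*', 'x'] := rfl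
  rw [h2, join_split1]
  simp
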